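-- pv_equiv track=rewrite | github.com/olivierpons/evalr | wizard/views/json/step/base.py | breadcrumb_pop_until
-- ===== SOURCE A (Python) =====
-- def breadcrumb_pop_until(data, step):
--     # change breadcrumb
--     breadcrumb = data.get('breadcrumb', [])
--     while len(breadcrumb):
--         if breadcrumb[-1]['step'] == step:
--             breadcrumb.pop()  # remove this step too (we're on it!)
--             break
--         breadcrumb.pop()
--     return breadcrumb
-- ===== SOURCE B (Python) =====
-- def breadcrumb_pop_until(data, step):
--     # One forward pass records the index of the LAST element whose 'step' equals
--     # step; a single `del breadcrumb[cut:]` then truncates the same list object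
--     # (cut defaults to 0, so no match empties the list, like A).
--     breadcrumb = data.get('breadcrumb', [])
--     cut = 0
--     for i, element in enumerate(breadcrumb):
--         if element.get('step') == step:
--             cut = i
--     del breadcrumb[cut:]
--     return breadcrumb
-- ===== Notes on version B (the rewrite author's own statement) =====
-- stated objective: alternative
-- what changed: Replaced A's destructive pop-one-at-a-time while-loop over the list tail by a single forward pass recording the index of the last element whose 'step' matches, followed by one bulk truncation del breadcrumb[cut:].
import Mathlib
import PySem

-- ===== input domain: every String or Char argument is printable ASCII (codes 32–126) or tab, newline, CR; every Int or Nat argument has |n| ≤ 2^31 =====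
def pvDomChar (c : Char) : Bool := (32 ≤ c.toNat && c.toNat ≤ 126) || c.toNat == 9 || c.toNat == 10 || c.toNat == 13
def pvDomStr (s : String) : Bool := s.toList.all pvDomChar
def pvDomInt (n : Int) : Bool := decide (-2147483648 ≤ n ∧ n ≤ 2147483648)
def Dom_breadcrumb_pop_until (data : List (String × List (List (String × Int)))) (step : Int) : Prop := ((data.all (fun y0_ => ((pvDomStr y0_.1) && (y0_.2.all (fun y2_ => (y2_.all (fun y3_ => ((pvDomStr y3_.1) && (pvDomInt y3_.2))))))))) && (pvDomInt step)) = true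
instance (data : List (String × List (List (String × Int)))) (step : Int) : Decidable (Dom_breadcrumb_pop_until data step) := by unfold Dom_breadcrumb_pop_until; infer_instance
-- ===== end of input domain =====

-- B replaces A's destructive pop-from-the-end loop by one forward pass that records the
-- last index matching `step` followed by a single truncation; the equivalence proved is
-- about the return value (in Python both leave data['breadcrumb'] in the same final state).

-- shared helper: element['step'] as a first-match association-list lookup (none = KeyError)
def stepOf (d : List (String × Int)) : Option Int := (PySem.Dict.mk d).get? "step"

-- ===== PORT A =====
-- the while-loop: pops from the end until the popped element's 'step' equals step
def popLoop (b : List (List (String × Int))) (step : Int) : List (List (String × Int)) :=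
  if _h : b.length = 0 then b
  else
    match (PySem.List.pyGet? b (-1)).bind stepOf with
    | some v => if v = step then b.dropLast else popLoop b.dropLast step
    | none => []   -- Python raises KeyError here; excluded by Pre_
termination_by b.length
decreasing_by simp [List.length_dropLast]; omega

def breadcrumb_pop_until (data : List (String × List (List (String × Int)))) (step : Int) : List (List (String × Int)) :=
  popLoop ((PySem.Dict.mk data).getD "breadcrumb" []) step

-- ===== PORT B =====
-- index of the last element whose 'step' equals step (0 if none), as Source B's for-loop computes it
def lastMatch (b : List (List (String × Int))) (step : Int) : Int :=
  (PySem.List.enumerate b 0).foldl (fun cut p => if stepOf p.2 = some step then p.1 else cut) 0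

def breadcrumb_pop_until_alt (data : List (String × List (List (String × Int)))) (step : Int) : List (List (String × Int)) :=
  let breadcrumb := (PySem.Dict.mk data).getD "breadcrumb" []
  -- del breadcrumb[cut:] leaves breadcrumb[:cut]
  PySem.List.slice breadcrumb none (some (lastMatch breadcrumb step))

-- ===== PRECONDITION & SPEC =====
-- Pre_ excludes exactly the inputs where A raises KeyError: some breadcrumb element
-- without a 'step' key that has no element matching step strictly after it.
def Pre_breadcrumb_pop_until (data : List (String × List (List (String × Int)))) (step : Int) : Prop :=
  ∀ i < ((PySem.Dict.mk data).getD "breadcrumb" []).length,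
    stepOf (((PySem.Dict.mk data).getD "breadcrumb" []).getD i []) = none →
      ∃ j, j < ((PySem.Dict.mk data).getD "breadcrumb" []).length ∧ i < j ∧
        stepOf (((PySem.Dict.mk data).getD "breadcrumb" []).getD j []) = some step
instance (data : List (String × List (List (String × Int)))) (step : Int) : Decidable (Pre_breadcrumb_pop_until data step) := by unfold Pre_breadcrumb_pop_until; infer_instance

def pvWitness_breadcrumb_pop_until : (List (String × List (List (String × Int)))) × Int :=
  ([("breadcrumb", [[("step", 2)], [("step", 1)]])], 1)

def Spec_breadcrumb_pop_until (data : List (String × List (List (String × Int)))) (step : Int) (out : List (List (String × Int))) : Prop := out = breadcrumb_pop_until_alt data step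
instance (data : List (String × List (List (String × Int)))) (step : Int) (out : List (List (String × Int))) : Decidable (Spec_breadcrumb_pop_until data step out) := by unfold Spec_breadcrumb_pop_until; infer_instance

-- ===== CLAIM (what is proved, stated in full; the proofs are below) =====
def Claim_equal_breadcrumb_pop_until : Prop := ∀ (data : List (String × List (List (String × Int)))) (step : Int), Dom_breadcrumb_pop_until data step → Pre_breadcrumb_pop_until data step → Spec_breadcrumb_pop_until data step (breadcrumb_pop_until data step)

-- ===== LEMMAS AND PROOFS =====

lemma lastMatch_concat (xs : List (List (String × Int))) (x : List (String × Int)) (step : Int) :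
    lastMatch (xs ++ [x]) step
      = if stepOf x = some step then (xs.length : Int) else lastMatch xs step := by
  simp [lastMatch, PySem.List.enumerate_append, List.foldl_append]

lemma lastMatch_bounds (xs : List (List (String × Int))) (step : Int) :
    0 ≤ lastMatch xs step ∧ lastMatch xs step ≤ (xs.length : Int) := by
  induction xs using List.reverseRecOn with
  | nil => simp [lastMatch]
  | append_singleton xs x ih =>
    rw [lastMatch_concat]
    split_ifs <;> (simp only [List.length_append, List.length_cons, List.length_nil]; omega)

lemma popLoop_eq (step : Int) :
    ∀ b : List (List (String × Int)),
      (∀ i, i < b.length → stepOf (b.getD i []) = none →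
        ∃ j, j < b.length ∧ i < j ∧ stepOf (b.getD j []) = some step) →
      popLoop b step = b.take (lastMatch b step).toNat := by
  intro b
  induction b using List.reverseRecOn with
  | nil => intro _; simp [popLoop, lastMatch]
  | append_singleton xs x ih =>
    intro h
    rw [popLoop]
    have hne : (xs ++ [x]).length ≠ 0 := by simp
    rw [dif_neg hne, PySem.List.pyGet?_neg_one_append_singleton]
    simp only [Option.bind_some]
    cases hst : stepOf x with
    | none =>
      exfalso
      obtain ⟨j, hj, hij, hmatch⟩ := h xs.length (by simp) (by
        simpa [List.getD] using hst)
      simp at hj; omega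
    | some v =>
      show (if v = step then (xs ++ [x]).dropLast else popLoop (xs ++ [x]).dropLast step)
          = List.take (lastMatch (xs ++ [x]) step).toNat (xs ++ [x])
      by_cases hv : v = step
      · rw [if_pos hv, lastMatch_concat, if_pos (by rw [hst, hv])]
        simp
      · rw [if_neg hv, List.dropLast_concat, lastMatch_concat,
          if_neg (by rw [hst]; simp [hv])]
        have hbound := lastMatch_bounds xs step
        have hle : (lastMatch xs step).toNat ≤ xs.length := by omega
        rw [List.take_append_of_le_length hle]
        apply ih
        intro i hi hnone
        have hnone' : stepOf ((xs ++ [x]).getD i []) = none := by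
          rwa [List.getD_append _ _ _ _ hi]
        obtain ⟨j, hj, hij, hmatch⟩ := h i (by simp; omega) hnone'
        simp at hj
        rcases Nat.lt_or_ge j xs.length with hjlt | hjge
        · exact ⟨j, hjlt, hij, by rwa [List.getD_append _ _ _ _ hjlt] at hmatch⟩
        · exfalso
          have hjeq : j = xs.length := by omega
          subst hjeq
          rw [show ((xs ++ [x]).getD xs.length []) = x by
            simp [List.getD]] at hmatch
          rw [hst] at hmatch
          exact hv (by injection hmatch)

-- ===== VERDICT (by name: the statement is the Claim_ definition above) =====
theorem breadcrumb_pop_until_spec : Claim_equal_breadcrumb_pop_until := by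
  intro data step _hdom hpre
  unfold Spec_breadcrumb_pop_until breadcrumb_pop_until breadcrumb_pop_until_alt
  unfold Pre_breadcrumb_pop_until at hpre
  rw [popLoop_eq step _ hpre]
  rw [PySem.List.slice_to _ (lastMatch_bounds _ step).1]
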